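-- pv_equiv track=rewrite | github.com/DarkFoxGnS/PythonHabitManager | Analytics.py | computeMissedStreak
-- ===== SOURCE A (Python) =====
-- def computeMissedStreak(history_):
--     """
--     Inputs history_ list of a Task, in the form of [id, success, deadline,date]
--     Returns the largest streak of missed tasks in the history.
--     """
--     streak = 0
--     highestStreak = 0
--     for history in history_:
--         if history[1] == 0:
--             streak +=1
--         else:
--             streak = 0
--         if streak > highestStreak:
--             highestStreak = streak
--
--     return highestStreak
-- ===== SOURCE B (Python) =====
-- from itertools import groupby
--
-- def computeMissedStreak(history_):
--     """
--     Inputs history_ list of a Task, in the form of [id, success, deadline,date]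
--     Returns the largest streak of missed tasks in the history.
--     """
--     return max((sum(1 for _ in g)
--                 for k, g in groupby(history_, key=lambda h: h[1] == 0) if k),
--                default=0)
-- ===== Notes on version B (the rewrite author's own statement) =====
-- stated objective: idiomatic
-- what changed: B segments the history into maximal runs with itertools.groupby keyed on h[1]==0 and takes the max length among missed runs (default 0), instead of A's fused streak counter with a best-so-far accumulator.
import Mathlib
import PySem

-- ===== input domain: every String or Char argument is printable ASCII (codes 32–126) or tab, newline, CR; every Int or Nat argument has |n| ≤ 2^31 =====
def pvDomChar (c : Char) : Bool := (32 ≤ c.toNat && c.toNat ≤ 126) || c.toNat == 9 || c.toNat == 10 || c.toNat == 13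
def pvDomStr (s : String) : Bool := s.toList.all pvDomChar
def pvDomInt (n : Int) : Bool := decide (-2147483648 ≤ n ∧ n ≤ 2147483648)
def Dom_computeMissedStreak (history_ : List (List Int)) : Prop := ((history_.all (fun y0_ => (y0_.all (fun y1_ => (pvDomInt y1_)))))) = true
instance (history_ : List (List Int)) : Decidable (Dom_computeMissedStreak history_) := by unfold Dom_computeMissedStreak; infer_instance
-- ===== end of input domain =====

-- B segments the history into maximal runs of misses (itertools.groupby) and takes the max run length,
-- instead of A's fused streak counter; same O(n) cost, more idiomatic.


-- ===== PORT A =====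
-- shared tiny predicate: Python's `h[1] == 0` (pyGet? is none exactly where Python raises IndexError)
def pvMiss (h : List Int) : Bool := PySem.List.pyGet? h 1 == some (0 : Int)

def computeMissedStreak (history_ : List (List Int)) : Int :=
  (history_.foldl
    (fun (st : Int × Int) h =>
      let streak : Int := if pvMiss h then st.1 + 1 else 0
      (streak, if streak > st.2 then streak else st.2))
    (0, 0)).2

-- ===== PORT B =====
-- groupby(history_, key=h[1]==0): a maximal missed run is head ++ takeWhile pvMiss;
-- non-missed elements are skipped; max over missed-run lengths with default 0.
def computeMissedStreak_alt : List (List Int) → Int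
  | [] => 0
  | x :: rest =>
    if pvMiss x then
      max (1 + ((rest.takeWhile pvMiss).length : Int))
          (computeMissedStreak_alt (rest.dropWhile pvMiss))
    else
      computeMissedStreak_alt rest
termination_by l => l.length
decreasing_by
  · exact Nat.lt_succ_of_le (List.length_dropWhile_le _ _)
  · simp

-- ===== PRECONDITION & SPEC =====
-- A raises IndexError on history[1] when some entry has fewer than 2 elements; exactly those inputs are excluded.
def Pre_computeMissedStreak (history_ : List (List Int)) : Prop :=
  ∀ h ∈ history_, 2 ≤ h.length
instance (history_ : List (List Int)) : Decidable (Pre_computeMissedStreak history_) := by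
  unfold Pre_computeMissedStreak; infer_instance

def pvWitness_computeMissedStreak : List (List Int) :=
  [[1, 0, 5, 6], [1, 1, 5, 6], [2, 0, 5, 6], [2, 0, 5, 6]]

def Spec_computeMissedStreak (history_ : List (List Int)) (out : Int) : Prop := out = computeMissedStreak_alt history_
instance (history_ : List (List Int)) (out : Int) : Decidable (Spec_computeMissedStreak history_ out) := by unfold Spec_computeMissedStreak; infer_instance

-- ===== CLAIM (what is proved, stated in full; the proofs are below) =====
def Claim_equal_computeMissedStreak : Prop := ∀ (history_ : List (List Int)), Dom_computeMissedStreak history_ → Pre_computeMissedStreak history_ → Spec_computeMissedStreak history_ (computeMissedStreak history_)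

-- ===== LEMMAS AND PROOFS =====

-- A's loop body, named for the lemmas
def pvStep (st : Int × Int) (h : List Int) : Int × Int :=
  let streak : Int := if pvMiss h then st.1 + 1 else 0
  (streak, if streak > st.2 then streak else st.2)

theorem pvStep_fold_eq (history_ : List (List Int)) :
    computeMissedStreak history_ = (history_.foldl pvStep (0, 0)).2 := rfl

-- the best-so-far component distributes: carrying h is max h (carrying 0)
theorem pv_high_split (l : List (List Int)) :
    ∀ s h : Int, 0 ≤ s → 0 ≤ h →
      (l.foldl pvStep (s, h)).2 = max h (l.foldl pvStep (s, 0)).2 := by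
  induction l with
  | nil => intro s h hs hh; simp; omega
  | cons x l ih =>
    intro s h hs hh
    by_cases hx : pvMiss x
    · simp only [List.foldl_cons, pvStep, hx, if_true]
      rw [ih (s + 1) (if s + 1 > h then s + 1 else h) (by omega) (by omega),
          ih (s + 1) (if s + 1 > 0 then s + 1 else 0) (by omega) (by omega)]
      split_ifs <;> omega
    · have hx' : pvMiss x = false := by simpa using hx
      simp only [List.foldl_cons, pvStep, hx', Bool.false_eq_true, if_false]
      rw [ih 0 (if (0:Int) > h then 0 else h) le_rfl (by omega),
          ih 0 (if (0:Int) > 0 then 0 else 0) le_rfl (by omega)]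
      split_ifs <;> omega

-- folding A's step across an all-missed block, with best-so-far already ≥ streak
theorem pv_fold_run (t : List (List Int)) (hall : ∀ x ∈ t, pvMiss x = true) :
    ∀ s : Int, 0 ≤ s →
      t.foldl pvStep (s, s) = (s + (t.length : Int), s + (t.length : Int)) := by
  induction t with
  | nil => intro s hs; simp
  | cons x t ih =>
    intro s hs
    have hx : pvMiss x = true := hall x (List.mem_cons_self ..)
    simp only [List.foldl_cons, pvStep, hx, if_true]
    have h1 : (if s + 1 > s then s + 1 else s) = s + 1 := by omega
    rw [h1, ih (fun y hy => hall y (List.mem_cons_of_mem _ hy)) (s + 1) (by omega)]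
    simp only [Prod.mk.injEq, List.length_cons]
    push_cast
    omega

theorem pv_main (l : List (List Int)) :
    (l.foldl pvStep (0, 0)).2 = computeMissedStreak_alt l := by
  induction l using computeMissedStreak_alt.induct with
  | case1 => simp [computeMissedStreak_alt]
  | case2 x rest hx ih =>
    rw [computeMissedStreak_alt, if_pos hx]
    simp only [List.foldl_cons, pvStep, hx, if_true]
    norm_num
    have hsplit : rest = rest.takeWhile pvMiss ++ rest.dropWhile pvMiss :=
      (List.takeWhile_append_dropWhile).symm
    conv_lhs => rw [hsplit]
    rw [List.foldl_append,
        pv_fold_run _ (fun y hy => List.mem_takeWhile_imp hy) 1 (by omega)]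
    set t := rest.takeWhile pvMiss with ht
    set d := rest.dropWhile pvMiss with hd
    match hdm : d with
    | [] =>
      simp [computeMissedStreak_alt]
      omega
    | y :: d' =>
      have hy : pvMiss y = false := by
        have h2 := List.head_dropWhile_not (l := rest) (p := pvMiss) (by rw [← hd]; simp)
        simp only [← hd] at h2
        simpa using h2
      simp only [List.foldl_cons, pvStep, hy, Bool.false_eq_true, if_false]
      have h1 : (if (0:Int) > 1 + (t.length : Int) then (0:Int) else 1 + (t.length : Int))
          = 1 + (t.length : Int) := by omega
      rw [h1, pv_high_split d' 0 (1 + (t.length : Int)) le_rfl (by positivity)]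
      rw [computeMissedStreak_alt]
      simp only [hy, Bool.false_eq_true, if_false]
      have halt : computeMissedStreak_alt (y :: d') = computeMissedStreak_alt d' := by
        rw [computeMissedStreak_alt]; simp [hy]
      have h2 : (List.foldl pvStep (0, 0) (y :: d')).2 = (List.foldl pvStep (0, 0) d').2 := by
        simp only [List.foldl_cons, pvStep, hy, Bool.false_eq_true, if_false]
        norm_num
      rw [← halt, ← ih, h2]
  | case3 x rest hx ih =>
    have hx' : pvMiss x = false := by simpa using hx
    rw [computeMissedStreak_alt, if_neg (by simp [hx'])]
    simp only [List.foldl_cons, pvStep, hx', Bool.false_eq_true, if_false]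
    have h1 : (if (0:Int) > 0 then (0:Int) else 0) = 0 := by omega
    rw [h1, ih]

-- ===== VERDICT (by name: the statement is the Claim_ definition above) =====
theorem computeMissedStreak_spec : Claim_equal_computeMissedStreak := by
  intro history_ _ _
  unfold Spec_computeMissedStreak
  rw [pvStep_fold_eq, pv_main]
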